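-- pv_equiv track=rewrite | github.com/chuoer47/AlgorithmLearning | 刷题记录/其他平台/比赛/传智杯初赛2025/5.py | helper
-- ===== SOURCE A (Python) =====
-- def helper(s):
--     ans = 0
--     r = e = re = -1
--     n = len(s)
--     for idx, v in enumerate(s):
--         if v == "r":
--             ans += e + 1
--             r = idx
--             re = max(re, e)
--         elif v == "e":
--             ans += r + 1
--             e = idx
--             re = max(re, r)
--         else:
--             ans += re + 1
--     return ans
-- ===== SOURCE B (Python) =====
-- def helper(s):
--     # tables-then-shaped-sums: build (char, prevR, prevE) triples, then the re prefix-max table,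
--     # then sum the three shapes of contributions separately
--     tab = []
--     r = e = -1
--     for i, c in enumerate(s):
--         tab.append((c, r, e))
--         if c == "r":
--             r = i
--         elif c == "e":
--             e = i
--     retab = []
--     m = -1
--     for c, pr, pe in tab:
--         retab.append((c, m))
--         if c == "r":
--             m = max(m, pe)
--         elif c == "e":
--             m = max(m, pr)
--     sum_re = sum(pe + 1 for c, pr, pe in tab if c == "r") \
--            + sum(pr + 1 for c, pr, pe in tab if c == "e")
--     sum_other = sum(m + 1 for c, m in retab if c != "r" and c != "e")
--     return sum_re + sum_other
-- ===== Notes on version B (the rewrite author's own statement) =====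
-- stated objective: alternative
-- what changed: Replaces A's single fused accumulator loop by two table-building passes (nearest-previous-'r'/'e' triples and a prefix-max 're' table) followed by three shaped filtered sums.
import Mathlib
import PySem

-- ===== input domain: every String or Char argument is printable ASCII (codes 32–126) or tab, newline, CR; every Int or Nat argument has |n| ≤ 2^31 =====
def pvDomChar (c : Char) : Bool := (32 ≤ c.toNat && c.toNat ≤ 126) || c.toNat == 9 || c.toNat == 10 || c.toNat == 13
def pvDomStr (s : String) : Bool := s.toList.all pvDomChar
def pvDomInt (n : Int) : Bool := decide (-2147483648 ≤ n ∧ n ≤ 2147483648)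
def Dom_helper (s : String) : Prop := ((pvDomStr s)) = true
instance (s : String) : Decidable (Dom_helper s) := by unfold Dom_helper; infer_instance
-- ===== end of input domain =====

-- B replaces A's fused accumulator loop by prev-'r'/'e' tables plus a prefix-max table and shaped sums (alternative decomposition, same value).


-- ===== PORT A =====
-- the single fused loop of A: state (idx, ans, r, e, re)
def helperLoop : List Char → Int → Int → Int → Int → Int → Int
  | [], _, ans, _, _, _ => ans
  | v :: rest, idx, ans, r, e, re =>
    if v = 'r' then helperLoop rest (idx + 1) (ans + e + 1) idx e (max re e)
    else if v = 'e' then helperLoop rest (idx + 1) (ans + r + 1) r idx (max re r)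
    else helperLoop rest (idx + 1) (ans + re + 1) r e re

def helper (s : String) : Int := helperLoop s.toList 0 0 (-1) (-1) (-1)

-- ===== PORT B =====
-- first pass: (char, prevR, prevE) triple per position
def prevTab : List Char → Int → Int → Int → List (Char × Int × Int)
  | [], _, _, _ => []
  | c :: cs, i, r, e =>
    (c, r, e) :: prevTab cs (i + 1) (if c = 'r' then i else r) (if c = 'e' then i else e)

-- second pass: prefix-max 're' value per position
def reTab : List (Char × Int × Int) → Int → List (Char × Int)
  | [], _ => []
  | (c, pr, pe) :: t, m =>
    (c, m) :: reTab t (if c = 'r' then max m pe else if c = 'e' then max m pr else m)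

def helper_alt (s : String) : Int :=
  let tab := prevTab s.toList 0 (-1) (-1)
  let retab := reTab tab (-1)
  let sumRE :=
    (tab.filterMap (fun x => if x.1 = 'r' then some (x.2.2 + 1) else none)).sum
    + (tab.filterMap (fun x => if x.1 = 'e' then some (x.2.1 + 1) else none)).sum
  let sumO :=
    (retab.filterMap (fun x => if x.1 ≠ 'r' ∧ x.1 ≠ 'e' then some (x.2 + 1) else none)).sum
  sumRE + sumO

-- ===== PRECONDITION & SPEC =====
def Spec_helper (s : String) (out : Int) : Prop := out = helper_alt s
instance (s : String) (out : Int) : Decidable (Spec_helper s out) := by unfold Spec_helper; infer_instance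

-- ===== CLAIM (what is proved, stated in full; the proofs are below) =====
def Claim_equal_helper : Prop := ∀ (s : String), Dom_helper s → Spec_helper s (helper s)

-- ===== LEMMAS AND PROOFS =====
lemma helper_key : ∀ (cs : List Char) (i ans r e m : Int),
    helperLoop cs i ans r e m =
      ans
      + (((prevTab cs i r e).filterMap (fun x => if x.1 = 'r' then some (x.2.2 + 1) else none)).sum
         + ((prevTab cs i r e).filterMap (fun x => if x.1 = 'e' then some (x.2.1 + 1) else none)).sum)
      + ((reTab (prevTab cs i r e) m).filterMap (fun x => if x.1 ≠ 'r' ∧ x.1 ≠ 'e' then some (x.2 + 1) else none)).sum := by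
  intro cs
  induction cs with
  | nil => intro i ans r e m; simp [helperLoop, prevTab, reTab]
  | cons c t ih =>
    intro i ans r e m
    by_cases hr : c = 'r'
    · simp [helperLoop, prevTab, reTab, hr, ih]; ring
    · by_cases he : c = 'e'
      · simp [helperLoop, prevTab, reTab, he, ih]; ring
      · simp [helperLoop, prevTab, reTab, hr, he, ih]; ring

-- ===== VERDICT (by name: the statement is the Claim_ definition above) =====
theorem helper_spec : Claim_equal_helper := by
  intro s _
  unfold Spec_helper helper helper_alt
  simpa using helper_key s.toList 0 0 (-1) (-1) (-1)
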